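-- pv_equiv track=rewrite | github.com/StephenYPan/cbs-rust | cbs-python/cbs.py | find_dependency_conflict
-- ===== SOURCE A (Python) =====
-- def find_extended_mdd_conflict(mdds, paths):
--     """
--     Return true if there exists a cardinal conflict with the extended mdd, otherwise false.
--     """
--     start = min(len(paths[0]), len(paths[1]))
--     end = max(len(paths[0]), len(paths[1]))
--     if start == end:
--         return (False, None)
--     if len(paths[0]) > len(paths[1]):
--         mdds[0], mdds[1] = mdds[1], mdds[0]
--         paths[0], paths[1] = paths[1], paths[0]
--     vertex = paths[0][-1]
--     mdd = [(t, e) for t, e in mdds[1] if t >= start]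
--     for i in range(start, end):
--         mdd_vertex = set([e[1] for t, e in mdd if t == i])
--         if len(mdd_vertex) == 1 and mdd_vertex == {vertex}:
--             partial_collision = {'loc': [vertex], 'timestep': i}
--             return (True, partial_collision)
--     return (False, None)
--
-- def find_dependency_conflict(mdds, paths):
--     """
--     Return true if there exists a dependency conflict, otherwise false.
--     """
--     min_timestep = min(len(paths[0]), len(paths[1]))
--     joint_mdd = set()
--     joint_mdd.add((0, (paths[0][0], paths[1][0])))
--     for i in range(1, min_timestep):
--         agent1_edge = [e for t, e in mdds[0] if t == i]
--         agent2_edge = [e for t, e in mdds[1] if t == i]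
--         dependency_conflict = True
--         for e1 in agent1_edge:
--             for e2 in agent2_edge:
--                 if (i - 1, (e1[0], e2[0])) not in joint_mdd:
--                     continue
--                 if e1[1] == e2[1]:  # Vertex collision
--                     continue
--                 if e1[1] == e2[0] and e1[0] == e2[1]:  # Edge collision
--                     continue
--                 dependency_conflict = False
--                 joint_mdd.add((i, (e1[1], e2[1])))
--         if dependency_conflict:
--             return True
--     return find_extended_mdd_conflict(mdds, paths)[0]
-- ===== SOURCE B (Python) =====
-- def find_dependency_conflict(mdds, paths):
--     """
--     Backward dynamic programming over the joint MDD: instead of propagating the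
--     reachable pair layer forward and stopping at the first empty layer, compute
--     (from the last common timestep back to timestep 1) the set W of pair-sources
--     that start a compatible suffix chain reaching the last level; a dependency
--     conflict exists iff the start pair cannot reach the last level, i.e. iff the
--     start pair is not in the final W.  (Return value only: A swaps mdds[0]/mdds[1]
--     and paths[0]/paths[1] in place when paths[0] is longer; B never mutates.)
--     """
--     m0, m1 = mdds[0], mdds[1]
--     p0, p1 = paths[0], paths[1]
--     min_t = min(len(p0), len(p1))
--     # group each agent's edges by timestep once
--     by0 = {}
--     for t, e in m0:
--         by0.setdefault(t, []).append(e)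
--     by1 = {}
--     for t, e in m1:
--         by1.setdefault(t, []).append(e)
--     W = None  # None = no constraint (beyond the last common level)
--     for i in reversed(range(1, min_t)):
--         W = {(a1, a2)
--              for a1, b1 in by0.get(i, [])
--              for a2, b2 in by1.get(i, [])
--              if b1 != b2 and not (b1 == a2 and a1 == b2)
--              and (W is None or (b1, b2) in W)}
--     if W is not None and (p0[0], p1[0]) not in W:
--         return True
--     # cardinal conflict against the extended MDD of the longer path
--     if len(p0) == len(p1):
--         return False
--     vertex, long_mdd = (p0[-1], m1) if len(p0) < len(p1) else (p1[-1], m0)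
--     verts = {}
--     for t, e in long_mdd:
--         verts.setdefault(t, []).append(e[1])
--     return any(verts.get(i) is not None and all(v == vertex for v in verts[i])
--                for i in range(min_t, max(len(p0), len(p1))))
-- ===== Notes on version B (the rewrite author's own statement) =====
-- stated objective: alternative
-- what changed: B replaces A's forward layer-by-layer joint-MDD propagation (grow a tagged joint set, stop at the first empty layer) by a backward dynamic program: it groups each agent's edges by timestep once, then sweeps the timesteps from last to first computing the set of pair-sources that start a compatible suffix chain reaching the last common level, and reports a dependency conflict iff the start pair is not in that set; the extended-MDD tail check likewise becomes one grouping pass plus an all-targets-equal test per timestep; …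
-- outside the precondition, e.g. on find_dependency_conflict([], [[7], [8]]): A returns False, B raises IndexError
import Mathlib
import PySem

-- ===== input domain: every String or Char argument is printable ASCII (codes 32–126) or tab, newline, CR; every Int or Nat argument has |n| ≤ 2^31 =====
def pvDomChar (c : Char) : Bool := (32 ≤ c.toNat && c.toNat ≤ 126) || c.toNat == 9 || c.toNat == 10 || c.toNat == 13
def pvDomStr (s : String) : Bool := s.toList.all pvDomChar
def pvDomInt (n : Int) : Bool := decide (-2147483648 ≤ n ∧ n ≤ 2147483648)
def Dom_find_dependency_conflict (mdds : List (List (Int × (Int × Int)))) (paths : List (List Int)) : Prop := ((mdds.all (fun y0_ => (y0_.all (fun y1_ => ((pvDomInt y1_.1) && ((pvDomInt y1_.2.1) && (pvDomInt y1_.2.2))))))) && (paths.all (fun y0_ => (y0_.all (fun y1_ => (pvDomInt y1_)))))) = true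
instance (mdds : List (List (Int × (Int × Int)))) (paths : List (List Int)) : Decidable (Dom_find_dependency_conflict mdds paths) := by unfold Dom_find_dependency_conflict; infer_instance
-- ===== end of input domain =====

-- B replaces A's forward layer-by-layer joint-MDD propagation by a backward dynamic
-- program: edges grouped by timestep once, then a last-to-first sweep computing the set of
-- pair-sources that start a compatible suffix chain, conflict iff the start pair is absent;
-- return value only (A swaps mdds[0]/mdds[1] and paths[0]/paths[1] in place when paths[0]
-- is longer, B never mutates its arguments).

-- ===== PORT A =====
-- inner double loop of A over the two agents' level-i edges, state = (dependency_conflict, joint_mdd)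
def pvAStep (i : Int) (e1 e2 : Int × Int) (acc : Bool × PySem.Set (Int × (Int × Int))) :
    Bool × PySem.Set (Int × (Int × Int)) :=
  if acc.2.contains (i - 1, (e1.1, e2.1)) = false then acc
  else if e1.2 = e2.2 then acc
  else if e1.2 = e2.1 ∧ e1.1 = e2.2 then acc
  else (false, acc.2.add (i, (e1.2, e2.2)))

def pvAInner (i : Int) (es1 es2 : List (Int × Int)) (acc : Bool × PySem.Set (Int × (Int × Int))) :
    Bool × PySem.Set (Int × (Int × Int)) :=
  es1.foldl (fun acc e1 => es2.foldl (fun acc e2 => pvAStep i e1 e2 acc) acc) acc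

-- for i in range(1, min_timestep): … ; early return True on a dependency conflict
def pvALoop (m0 m1 : List (Int × (Int × Int))) :
    List Int → PySem.Set (Int × (Int × Int)) → Bool
  | [], _ => false
  | i :: rest, joint =>
    let es1 := (m0.filter (fun te => te.1 == i)).map (fun te => te.2)
    let es2 := (m1.filter (fun te => te.1 == i)).map (fun te => te.2)
    let r := pvAInner i es1 es2 (true, joint)
    if r.1 then true else pvALoop m0 m1 rest r.2

-- for i in range(start, end) of find_extended_mdd_conflict
def pvAExtLoop (mdd : List (Int × (Int × Int))) (vertex : Int) :
    List Int → Bool × Option (List Int × Int)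
  | [] => (false, none)
  | i :: rest =>
    let mdd_vertex : PySem.Set Int :=
      PySem.Set.ofList ((mdd.filter (fun te => te.1 == i)).map (fun te => te.2.2))
    if mdd_vertex.len = 1 ∧ PySem.Set.equal mdd_vertex (PySem.Set.ofList [vertex]) then
      (true, some ([vertex], i))      -- partial_collision as (loc list, timestep)
    else pvAExtLoop mdd vertex rest

def find_extended_mdd_conflict (mdds : List (List (Int × (Int × Int)))) (paths : List (List Int)) :
    Bool × Option (List Int × Int) :=
  let p0 := paths.getD 0 []
  let p1 := paths.getD 1 []
  let start : Int := min (p0.length : Int) (p1.length : Int)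
  let end_ : Int := max (p0.length : Int) (p1.length : Int)
  if start = end_ then (false, none)
  else
    -- the in-place swap: afterwards paths[0] is the shorter path, mdds[1] the longer agent's mdd
    let m1' := if p0.length > p1.length then mdds.getD 0 [] else mdds.getD 1 []
    let p0' := if p0.length > p1.length then p1 else p0
    let vertex := PySem.List.pyGetD p0' (-1) 0
    let mdd := m1'.filter (fun te => decide (te.1 ≥ start))
    pvAExtLoop mdd vertex (PySem.List.pyRange start end_)

def find_dependency_conflict (mdds : List (List (Int × (Int × Int)))) (paths : List (List Int)) : Bool :=
  let p0 := paths.getD 0 []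
  let p1 := paths.getD 1 []
  let m0 := mdds.getD 0 []
  let m1 := mdds.getD 1 []
  let minT : Int := min (p0.length : Int) (p1.length : Int)
  let joint0 : PySem.Set (Int × (Int × Int)) :=
    PySem.Set.add PySem.Set.empty (0, (PySem.List.pyGetD p0 0 0, PySem.List.pyGetD p1 0 0))
  if pvALoop m0 m1 (PySem.List.pyRange 1 minT) joint0 then true
  else (find_extended_mdd_conflict mdds paths).1

-- ===== PORT B =====
-- by0/by1: one grouping pass, dict timestep -> edges (setdefault(t, []).append(e))
def pvGroup (l : List (Int × (Int × Int))) : PySem.Dict Int (List (Int × Int)) :=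
  l.foldl (fun d p => d.modify p.1 [] (fun xs => xs ++ [p.2])) PySem.Dict.empty

-- verts: timestep -> target vertices of the longer agent's mdd edges
def pvGroupTgt (l : List (Int × (Int × Int))) : PySem.Dict Int (List Int) :=
  l.foldl (fun d te => d.modify te.1 [] (fun xs => xs ++ [te.2.2])) PySem.Dict.empty

-- (W is None or p in W): no constraint beyond the last processed level
def pvWCond (W : Option (PySem.Set (Int × Int))) (p : Int × Int) : Bool :=
  match W with
  | none => true
  | some w => w.contains p

-- one backward step: the set comprehension over the level-i compatible edge pairs whose
-- target pair satisfies the constraint W of the already-processed later levels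
def pvBLevel (by0 by1 : PySem.Dict Int (List (Int × Int)))
    (W : Option (PySem.Set (Int × Int))) (i : Int) : PySem.Set (Int × Int) :=
  (by0.getD i []).foldl (fun s e1 =>
    (by1.getD i []).foldl (fun s e2 =>
      if !(e1.2 == e2.2) && !(e1.2 == e2.1 && e1.1 == e2.2) && pvWCond W (e1.2, e2.2) then
        s.add (e1.1, e2.1)
      else s) s) PySem.Set.empty

-- W is not None and start not in W
def pvBDep (W : Option (PySem.Set (Int × Int))) (s : Int × Int) : Bool :=
  match W with
  | none => false
  | some w => !w.contains s

-- any(l and all(v == vertex for v in l) for i in range(min_t, max_t)) with l = verts.get(i, [])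
def pvBTail (verts : PySem.Dict Int (List Int)) (vertex : Int) : List Int → Bool
  | [] => false
  | i :: rest =>
    let l := verts.getD i []
    if !l.isEmpty && l.all (fun v => v == vertex) then true else pvBTail verts vertex rest

def find_dependency_conflict_alt (mdds : List (List (Int × (Int × Int)))) (paths : List (List Int)) : Bool :=
  let m0 := mdds.getD 0 []
  let m1 := mdds.getD 1 []
  let p0 := paths.getD 0 []
  let p1 := paths.getD 1 []
  let minT : Int := min (p0.length : Int) (p1.length : Int)
  -- for i in reversed(range(1, min_t)): W = {…}
  let W : Option (PySem.Set (Int × Int)) :=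
    ((PySem.List.pyRange 1 minT).reverse).foldl
      (fun W i => some (pvBLevel (pvGroup m0) (pvGroup m1) W i)) none
  if pvBDep W (PySem.List.pyGetD p0 0 0, PySem.List.pyGetD p1 0 0) then true
  else if (p0.length : Int) = (p1.length : Int) then false
  else
    let vm := if p0.length < p1.length then (PySem.List.pyGetD p0 (-1) 0, m1)
              else (PySem.List.pyGetD p1 (-1) 0, m0)
    pvBTail (pvGroupTgt vm.2) vm.1
      (PySem.List.pyRange minT (max (p0.length : Int) (p1.length : Int)))

-- ===== PRECONDITION & SPEC =====
-- Pre_ excludes exactly the inputs where the Python A raises IndexError (fewer than two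
-- paths, an empty first or second path, or fewer than two mdds while the mdds are needed);
-- it also excludes the corner with fewer than two mdds but two singleton paths, where A
-- returns False without ever touching mdds while B indexes mdds up front and raises.
def Pre_find_dependency_conflict (mdds : List (List (Int × (Int × Int)))) (paths : List (List Int)) : Prop :=
  2 ≤ paths.length ∧ paths.getD 0 [] ≠ [] ∧ paths.getD 1 [] ≠ [] ∧ 2 ≤ mdds.length
instance (mdds : List (List (Int × (Int × Int)))) (paths : List (List Int)) : Decidable (Pre_find_dependency_conflict mdds paths) := by unfold Pre_find_dependency_conflict; infer_instance

def pvWitness_find_dependency_conflict : (List (List (Int × (Int × Int)))) × List (List Int) :=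
  ([[(1, (0, 1))], [(1, (0, 2))]], [[0, 1], [0, 2]])

def Spec_find_dependency_conflict (mdds : List (List (Int × (Int × Int)))) (paths : List (List Int)) (out : Bool) : Prop := out = find_dependency_conflict_alt mdds paths
instance (mdds : List (List (Int × (Int × Int)))) (paths : List (List Int)) (out : Bool) : Decidable (Spec_find_dependency_conflict mdds paths out) := by unfold Spec_find_dependency_conflict; infer_instance

-- ===== CLAIM (what is proved, stated in full; the proofs are below) =====
def Claim_equal_find_dependency_conflict : Prop := ∀ (mdds : List (List (Int × (Int × Int)))) (paths : List (List Int)), Dom_find_dependency_conflict mdds paths → Pre_find_dependency_conflict mdds paths → Spec_find_dependency_conflict mdds paths (find_dependency_conflict mdds paths)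

-- ===== LEMMAS AND PROOFS =====

-- level-i edges of an mdd, as A extracts them
def pvE (m : List (Int × (Int × Int))) (i : Int) : List (Int × Int) :=
  (m.filter (fun te => te.1 == i)).map (fun te => te.2)

-- "from pair p there is a compatible edge-pair chain through the levels of the list"
def pvChain (m0 m1 : List (Int × (Int × Int))) : List Int → (Int × Int) → Bool
  | [], _ => true
  | i :: rest, p =>
    (pvE m0 i).any fun e1 => (pvE m1 i).any fun e2 =>
      e1.1 == p.1 && e2.1 == p.2 && !(e1.2 == e2.2) && !(e1.2 == e2.1 && e1.1 == e2.2)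
        && pvChain m0 m1 rest (e1.2, e2.2)

-- proof-side forward successor step / layer (mirrors what A's inner loop adds)
def pvFStep (layer : PySem.Set (Int × Int)) (e1 e2 : Int × Int) (nxt : PySem.Set (Int × Int)) :
    PySem.Set (Int × Int) :=
  if layer.contains (e1.1, e2.1) && !(e1.2 == e2.2) && !(e1.2 == e2.1 && e1.1 == e2.2) then
    nxt.add (e1.2, e2.2)
  else nxt

def pvFInner (layer : PySem.Set (Int × Int)) (es1 es2 : List (Int × Int)) : PySem.Set (Int × Int) :=
  es1.foldl (fun nxt e1 => es2.foldl (fun nxt e2 => pvFStep layer e1 e2 nxt) nxt) PySem.Set.empty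

lemma pvRange_nil {a b : Int} (h : b ≤ a) : PySem.List.pyRange a b = [] :=
  List.eq_nil_iff_forall_not_mem.mpr
    (fun _ hx => by have := PySem.List.mem_pyRange_one.1 hx; omega)

-- dict grouping = per-timestep filter of the edge list
lemma pvGroup_getD (l : List (Int × (Int × Int))) (i : Int) :
    (pvGroup l).getD i [] = pvE l i := by
  simpa [pvE] using PySem.Dict.getD_foldl_modify_append l PySem.Dict.empty i

lemma pvGroupTgt_getD (l : List (Int × (Int × Int))) (i : Int) :
    (pvGroupTgt l).getD i [] = (l.filter (fun te => te.1 == i)).map (fun te => te.2.2) := by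
  have h := PySem.Dict.getD_foldl_modify_append
      (l.map (fun te => (te.1, te.2.2))) PySem.Dict.empty i
  rw [List.foldl_map] at h
  simpa [pvGroupTgt, List.filter_map, Function.comp] using h

-- membership of a conditional-add fold (one list)
lemma pvMem_foldl_add_if1 {α β : Type} [BEq β] [LawfulBEq β] (c : α → Bool) (f : α → β)
    (l : List α) : ∀ (s : PySem.Set β) (q : β),
    q ∈ l.foldl (fun s e => if c e then PySem.Set.add s (f e) else s) s ↔
      q ∈ s ∨ ∃ e ∈ l, c e = true ∧ q = f e := by
  induction l with
  | nil => intro s q; simp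
  | cons e rest ih =>
    intro s q
    rw [List.foldl_cons, ih]
    by_cases hc : c e = true
    · rw [if_pos hc, PySem.Set.mem_add]
      constructor
      · rintro ((h | h) | ⟨x, hx, hcx, rfl⟩)
        · exact Or.inl h
        · exact Or.inr ⟨e, List.mem_cons_self .., hc, h⟩
        · exact Or.inr ⟨x, List.mem_cons_of_mem _ hx, hcx, rfl⟩
      · rintro (h | ⟨x, hx, hcx, rfl⟩)
        · exact Or.inl (Or.inl h)
        · rcases List.mem_cons.1 hx with rfl | hx
          · exact Or.inl (Or.inr rfl)
          · exact Or.inr ⟨x, hx, hcx, rfl⟩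
    · rw [if_neg hc]
      constructor
      · rintro (h | ⟨x, hx, hcx, rfl⟩)
        · exact Or.inl h
        · exact Or.inr ⟨x, List.mem_cons_of_mem _ hx, hcx, rfl⟩
      · rintro (h | ⟨x, hx, hcx, rfl⟩)
        · exact Or.inl h
        · rcases List.mem_cons.1 hx with rfl | hx
          · exact absurd hcx hc
          · exact Or.inr ⟨x, hx, hcx, rfl⟩

-- membership of a nested conditional-add fold (two lists)
lemma pvMem_foldl_add_if2 {α₁ α₂ β : Type} [BEq β] [LawfulBEq β]
    (c : α₁ → α₂ → Bool) (f : α₁ → α₂ → β) (l1 : List α₁) (l2 : List α₂) :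
    ∀ (s : PySem.Set β) (q : β),
    q ∈ l1.foldl (fun s e1 => l2.foldl
        (fun s e2 => if c e1 e2 then PySem.Set.add s (f e1 e2) else s) s) s ↔
      q ∈ s ∨ ∃ e1 ∈ l1, ∃ e2 ∈ l2, c e1 e2 = true ∧ q = f e1 e2 := by
  induction l1 with
  | nil => intro s q; simp
  | cons e1 rest ih =>
    intro s q
    rw [List.foldl_cons, ih, pvMem_foldl_add_if1]
    constructor
    · rintro ((h | ⟨e2, h2, hc, rfl⟩) | ⟨x1, hx1, x2, hx2, hc, rfl⟩)
      · exact Or.inl h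
      · exact Or.inr ⟨e1, List.mem_cons_self .., e2, h2, hc, rfl⟩
      · exact Or.inr ⟨x1, List.mem_cons_of_mem _ hx1, x2, hx2, hc, rfl⟩
    · rintro (h | ⟨x1, hx1, x2, hx2, hc, rfl⟩)
      · exact Or.inl (Or.inl h)
      · rcases List.mem_cons.1 hx1 with rfl | hx1
        · exact Or.inl (Or.inr ⟨x2, hx2, hc, rfl⟩)
        · exact Or.inr ⟨x1, hx1, x2, hx2, hc, rfl⟩

lemma pvMem_fInner (layer : PySem.Set (Int × Int)) (es1 es2 : List (Int × Int)) (q : Int × Int) :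
    q ∈ pvFInner layer es1 es2 ↔
      ∃ e1 ∈ es1, ∃ e2 ∈ es2,
        (layer.contains (e1.1, e2.1) && !(e1.2 == e2.2)
          && !(e1.2 == e2.1 && e1.1 == e2.2)) = true ∧ q = (e1.2, e2.2) := by
  have := pvMem_foldl_add_if2
      (fun (e1 e2 : Int × Int) =>
        layer.contains (e1.1, e2.1) && !(e1.2 == e2.2) && !(e1.2 == e2.1 && e1.1 == e2.2))
      (fun e1 e2 => (e1.2, e2.2)) es1 es2 PySem.Set.empty q
  simpa [pvFInner, pvFStep, PySem.Set.empty] using this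

-- the invariant of A's inner double loop: acc's flag and added pairs vs the forward layer
def pvRel (a : Int) (joint : PySem.Set (Int × (Int × Int)))
    (acc : Bool × PySem.Set (Int × (Int × Int))) (nxt : PySem.Set (Int × Int)) : Prop :=
  acc.1 = nxt.isEmpty ∧ ∀ j q, ((j, q) ∈ acc.2 ↔ (j, q) ∈ joint ∨ (j = a ∧ q ∈ nxt))

lemma pvAdd_not_isEmpty {α : Type} [BEq α] (s : PySem.Set α) (x : α) :
    (PySem.Set.add s x).isEmpty = false := by
  unfold PySem.Set.add
  split
  · cases s with
    | nil => simp [PySem.Set.contains] at *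
    | cons y t => simp
  · simp

lemma pvStep_rel (a : Int) (joint : PySem.Set (Int × (Int × Int))) (layer : PySem.Set (Int × Int))
    (hlay : ∀ p, ((a - 1, p) ∈ joint ↔ p ∈ layer)) (e1 e2 : Int × Int)
    (acc : Bool × PySem.Set (Int × (Int × Int))) (nxt : PySem.Set (Int × Int))
    (h : pvRel a joint acc nxt) :
    pvRel a joint (pvAStep a e1 e2 acc) (pvFStep layer e1 e2 nxt) := by
  obtain ⟨h1, h2⟩ := h
  have hcA : acc.2.contains (a - 1, (e1.1, e2.1)) = layer.contains (e1.1, e2.1) := by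
    simp only [PySem.Set.contains, List.contains_eq_mem]
    rw [decide_eq_decide, h2 (a - 1) (e1.1, e2.1), hlay (e1.1, e2.1)]
    constructor
    · rintro (hp | ⟨ha, _⟩)
      · exact hp
      · omega
    · exact Or.inl
  unfold pvAStep pvFStep
  rw [hcA]
  by_cases hv : e1.2 = e2.2
  · rw [if_pos hv, ite_self, if_neg (by simp [hv])]
    exact ⟨h1, h2⟩
  · by_cases he : e1.2 = e2.1 ∧ e1.1 = e2.2
    · rw [if_pos he, ite_self, ite_self, if_neg (by simp [he.1, he.2])]
      exact ⟨h1, h2⟩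
    · by_cases hc : layer.contains (e1.1, e2.1) = true
      · have hbe : (layer.contains (e1.1, e2.1) && !(e1.2 == e2.2) && !(e1.2 == e2.1 && e1.1 == e2.2)) = true := by
          rw [hc]
          simp [hv]
          tauto
        rw [if_neg (by rw [hc]; simp), if_neg hv, if_neg he, if_pos hbe]
        refine ⟨(pvAdd_not_isEmpty nxt _).symm, ?_⟩
        intro j q
        rw [show ((false, PySem.Set.add acc.2 (a, e1.2, e2.2)).2) = PySem.Set.add acc.2 (a, (e1.2, e2.2)) from rfl,
          PySem.Set.mem_add, h2 j q, PySem.Set.mem_add]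
        constructor
        · rintro ((hj | ⟨ha, hq⟩) | heq)
          · exact Or.inl hj
          · exact Or.inr ⟨ha, Or.inl hq⟩
          · rcases Prod.mk.injEq .. ▸ heq with ⟨rfl, rfl⟩
            exact Or.inr ⟨rfl, Or.inr rfl⟩
        · rintro (hj | ⟨ha, hq | rfl⟩)
          · exact Or.inl (Or.inl hj)
          · exact Or.inl (Or.inr ⟨ha, hq⟩)
          · subst ha; exact Or.inr rfl
      · simp only [Bool.not_eq_true] at hc
        rw [if_pos (by rw [hc]), if_neg (by rw [hc]; simp)]
        exact ⟨h1, h2⟩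

lemma pvFold2_rel (a : Int) (joint : PySem.Set (Int × (Int × Int))) (layer : PySem.Set (Int × Int))
    (hlay : ∀ p, ((a - 1, p) ∈ joint ↔ p ∈ layer)) (e1 : Int × Int) (es2 : List (Int × Int)) :
    ∀ (acc : Bool × PySem.Set (Int × (Int × Int))) (nxt : PySem.Set (Int × Int)),
    pvRel a joint acc nxt →
    pvRel a joint (es2.foldl (fun acc e2 => pvAStep a e1 e2 acc) acc)
      (es2.foldl (fun nxt e2 => pvFStep layer e1 e2 nxt) nxt) := by
  induction es2 with
  | nil => intro acc nxt h; exact h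
  | cons e2 rest ih =>
    intro acc nxt h
    exact ih _ _ (pvStep_rel a joint layer hlay e1 e2 acc nxt h)

lemma pvInner_rel (a : Int) (joint : PySem.Set (Int × (Int × Int))) (layer : PySem.Set (Int × Int))
    (hlay : ∀ p, ((a - 1, p) ∈ joint ↔ p ∈ layer)) (es1 es2 : List (Int × Int)) :
    pvRel a joint (pvAInner a es1 es2 (true, joint)) (pvFInner layer es1 es2) := by
  suffices h : ∀ (acc : Bool × PySem.Set (Int × (Int × Int))) (nxt : PySem.Set (Int × Int)),
      pvRel a joint acc nxt →
      pvRel a joint (pvAInner a es1 es2 acc)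
        (es1.foldl (fun nxt e1 => es2.foldl (fun nxt e2 => pvFStep layer e1 e2 nxt) nxt) nxt) by
    refine h (true, joint) PySem.Set.empty ⟨rfl, ?_⟩
    intro j q; simp [PySem.Set.empty]
  induction es1 with
  | nil => intro acc nxt h; exact h
  | cons e1 rest ih =>
    intro acc nxt h
    exact ih _ _ (pvFold2_rel a joint layer hlay e1 es2 acc nxt h)

-- the forward layer steps exactly the chain predicate one level
lemma pvAny_chain_step (m0 m1 : List (Int × (Int × Int))) (a : Int) (rest : List Int)
    (L : PySem.Set (Int × Int)) :
    (L.any fun p => pvChain m0 m1 (a :: rest) p)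
      = ((pvFInner L (pvE m0 a) (pvE m1 a)).any fun q => pvChain m0 m1 rest q) := by
  rw [Bool.eq_iff_iff, List.any_eq_true, List.any_eq_true]
  constructor
  · rintro ⟨⟨pa, pb⟩, hp, hc⟩
    rw [pvChain, List.any_eq_true] at hc
    obtain ⟨e1, h1, hc⟩ := hc
    rw [List.any_eq_true] at hc
    obtain ⟨e2, h2, hc⟩ := hc
    simp only [Bool.and_eq_true, beq_iff_eq] at hc
    obtain ⟨⟨⟨⟨hp1, hp2⟩, hv⟩, he⟩, hrest⟩ := hc
    refine ⟨(e1.2, e2.2), ?_, hrest⟩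
    rw [pvMem_fInner]
    refine ⟨e1, h1, e2, h2, ?_, rfl⟩
    have hmem : (e1.1, e2.1) ∈ L := by rw [hp1, hp2]; exact hp
    simpa [hv, he, PySem.Set.contains_iff] using hmem
  · rintro ⟨q, hq, hrest⟩
    rw [pvMem_fInner] at hq
    obtain ⟨e1, h1, e2, h2, hc, rfl⟩ := hq
    simp only [Bool.and_eq_true] at hc
    obtain ⟨⟨hcon, hv⟩, he⟩ := hc
    refine ⟨(e1.1, e2.1), (PySem.Set.contains_iff _ _).1 hcon, ?_⟩
    rw [pvChain, List.any_eq_true]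
    refine ⟨e1, h1, ?_⟩
    rw [List.any_eq_true]
    exact ⟨e2, h2, by simp [hv, he, hrest]⟩

-- A's loop is the negation of "some pair of the current layer starts a full chain"
lemma pvALoop_chain (m0 m1 : List (Int × (Int × Int))) (n : Nat) :
    ∀ (a b : Int) (joint : PySem.Set (Int × (Int × Int))) (L : PySem.Set (Int × Int)),
    (b - a).toNat ≤ n →
    (∀ j p, (j, p) ∈ joint → j < a) →
    (∀ p, ((a - 1, p) ∈ joint ↔ p ∈ L)) →
    L ≠ [] →
    pvALoop m0 m1 (PySem.List.pyRange a b) joint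
      = !(L.any fun p => pvChain m0 m1 (PySem.List.pyRange a b) p) := by
  induction n with
  | zero =>
    intro a b joint L hn _ _ hL
    rw [pvRange_nil (by omega)]
    obtain ⟨x, hx⟩ := List.exists_mem_of_ne_nil L hL
    have : (L.any fun p => pvChain m0 m1 [] p) = true :=
      List.any_eq_true.2 ⟨x, hx, rfl⟩
    rw [this]; rfl
  | succ n ih =>
    intro a b joint L hn hlt hlay hL
    by_cases hab : a < b
    · rw [PySem.List.pyRange_one_cons hab]
      show (let es1 := (m0.filter (fun te => te.1 == a)).map (fun te => te.2);
            let es2 := (m1.filter (fun te => te.1 == a)).map (fun te => te.2);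
            let r := pvAInner a es1 es2 (true, joint);
            if r.1 then true else pvALoop m0 m1 (PySem.List.pyRange (a+1) b) r.2)
        = !(L.any fun p => pvChain m0 m1 (a :: PySem.List.pyRange (a+1) b) p)
      simp only []
      have hrel := pvInner_rel a joint L hlay (pvE m0 a) (pvE m1 a)
      obtain ⟨hr1, hr2⟩ := hrel
      rw [show ((m0.filter (fun te => te.1 == a)).map (fun te => te.2)) = pvE m0 a from rfl,
          show ((m1.filter (fun te => te.1 == a)).map (fun te => te.2)) = pvE m1 a from rfl]
      set nxt := pvFInner L (pvE m0 a) (pvE m1 a) with hnxt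
      rw [hr1, pvAny_chain_step m0 m1 a (PySem.List.pyRange (a+1) b) L, ← hnxt]
      by_cases hempty : nxt.isEmpty = true
      · rw [if_pos hempty]
        rw [List.isEmpty_iff] at hempty
        rw [hempty]
        rfl
      · rw [if_neg hempty]
        have hne : nxt ≠ [] := fun h => hempty (by rw [h]; rfl)
        apply ih
        · omega
        · intro j p hjp
          rcases (hr2 j p).1 hjp with hj | ⟨rfl, _⟩
          · exact lt_trans (hlt j p hj) (by omega)
          · omega
        · intro p
          rw [show a + 1 - 1 = a by omega, hr2 a p]
          constructor
          · rintro (hj | ⟨_, hp⟩)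
            · exact absurd (hlt a p hj) (by omega)
            · exact hp
          · exact fun hp => Or.inr ⟨rfl, hp⟩
        · exact hne
    · rw [pvRange_nil (by omega)]
      obtain ⟨x, hx⟩ := List.exists_mem_of_ne_nil L hL
      have : (L.any fun p => pvChain m0 m1 [] p) = true :=
        List.any_eq_true.2 ⟨x, hx, rfl⟩
      rw [this]; rfl

-- B's backward sweep, as a foldr over the ascending level list
lemma pvBack_eq_foldr (m0 m1 : List (Int × (Int × Int))) (asc : List Int) :
    (asc.reverse).foldl (fun W i => some (pvBLevel (pvGroup m0) (pvGroup m1) W i)) none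
      = asc.foldr (fun i W => some (pvBLevel (pvGroup m0) (pvGroup m1) W i)) none :=
  List.foldl_reverse ..

lemma pvBack_none_iff (m0 m1 : List (Int × (Int × Int))) (asc : List Int) :
    asc.foldr (fun i W => some (pvBLevel (pvGroup m0) (pvGroup m1) W i)) none = none ↔ asc = [] := by
  cases asc <;> simp

-- membership in one backward level set
lemma pvMem_bLevel (m0 m1 : List (Int × (Int × Int))) (W : Option (PySem.Set (Int × Int)))
    (i : Int) (q : Int × Int) :
    q ∈ pvBLevel (pvGroup m0) (pvGroup m1) W i ↔
      ∃ e1 ∈ pvE m0 i, ∃ e2 ∈ pvE m1 i,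
        (!(e1.2 == e2.2) && !(e1.2 == e2.1 && e1.1 == e2.2) && pvWCond W (e1.2, e2.2)) = true
        ∧ q = (e1.1, e2.1) := by
  have h := pvMem_foldl_add_if2
      (fun (e1 e2 : Int × Int) =>
        !(e1.2 == e2.2) && !(e1.2 == e2.1 && e1.1 == e2.2) && pvWCond W (e1.2, e2.2))
      (fun e1 e2 => (e1.1, e2.1)) (pvE m0 i) (pvE m1 i) PySem.Set.empty q
  rw [pvBLevel, pvGroup_getD, pvGroup_getD]
  simpa [PySem.Set.empty] using h

-- one backward level = one chain step, given the constraint characterizes the suffix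
lemma pvBLevel_chain (m0 m1 : List (Int × (Int × Int))) (W : Option (PySem.Set (Int × Int)))
    (i : Int) (rest : List Int)
    (hW : ∀ p, pvWCond W p = true ↔ pvChain m0 m1 rest p = true) (q : Int × Int) :
    q ∈ pvBLevel (pvGroup m0) (pvGroup m1) W i ↔ pvChain m0 m1 (i :: rest) q = true := by
  obtain ⟨qa, qb⟩ := q
  rw [pvMem_bLevel, pvChain, List.any_eq_true]
  constructor
  · rintro ⟨e1, h1, e2, h2, hc, hq⟩
    rw [Bool.and_eq_true, Bool.and_eq_true] at hc
    obtain ⟨⟨hv, he⟩, hWc⟩ := hc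
    refine ⟨e1, h1, List.any_eq_true.2 ⟨e2, h2, ?_⟩⟩
    obtain ⟨rfl, rfl⟩ := Prod.mk.injEq .. ▸ hq
    simp [hv, he, (hW _).1 hWc]
  · rintro ⟨e1, h1, hc⟩
    rw [List.any_eq_true] at hc
    obtain ⟨e2, h2, hc⟩ := hc
    simp only [Bool.and_eq_true, beq_iff_eq] at hc
    obtain ⟨⟨⟨⟨hq1, hq2⟩, hv⟩, he⟩, hrest⟩ := hc
    refine ⟨e1, h1, e2, h2, ?_, by rw [hq1, hq2]⟩
    rw [Bool.and_eq_true, Bool.and_eq_true]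
    exact ⟨⟨hv, he⟩, (hW _).2 hrest⟩

-- the final backward set characterizes chain membership
lemma pvBack_mem (m0 m1 : List (Int × (Int × Int))) :
    ∀ (asc : List Int) (w : PySem.Set (Int × Int)),
    asc.foldr (fun i W => some (pvBLevel (pvGroup m0) (pvGroup m1) W i)) none = some w →
    ∀ q, q ∈ w ↔ pvChain m0 m1 asc q = true := by
  intro asc
  induction asc with
  | nil => intro w hw; simp at hw
  | cons i rest ih =>
    intro w hw q
    rw [List.foldr_cons, Option.some.injEq] at hw
    subst hw
    cases hWm : rest.foldr (fun i W => some (pvBLevel (pvGroup m0) (pvGroup m1) W i)) none with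
    | none =>
      have hrest : rest = [] := (pvBack_none_iff m0 m1 rest).1 hWm
      subst hrest
      exact pvBLevel_chain m0 m1 none i []
        (fun p => by constructor <;> (intro _; rfl)) q
    | some w' =>
      exact pvBLevel_chain m0 m1 (some w') i rest
        (fun p => by
          rw [show pvWCond (some w') p = w'.contains p from rfl, PySem.Set.contains_iff]
          exact ih w' hWm p) q

-- A's per-timestep set test = "some target and all targets equal vertex"
lemma pvExt_cond (l : List Int) (v : Int) :
    ((PySem.Set.ofList l).len = 1 ∧ PySem.Set.equal (PySem.Set.ofList l) (PySem.Set.ofList [v]) = true)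
      ↔ (!l.isEmpty && l.all (fun x => x == v)) = true := by
  constructor
  · rintro ⟨_, heq⟩
    rw [PySem.Set.equal_iff _ _] at heq
    have hv : v ∈ l := (PySem.Set.mem_ofList _ _).1 ((heq v).2 ((PySem.Set.mem_ofList _ _).2 (by simp)))
    have hall : ∀ x ∈ l, x = v := fun x hx => by
      have := (heq x).1 ((PySem.Set.mem_ofList _ _).2 hx)
      rw [PySem.Set.mem_ofList] at this
      simpa using this
    simp only [Bool.and_eq_true, List.all_eq_true]
    exact ⟨by simp [List.ne_nil_of_mem hv], fun x hx => by simp [hall x hx]⟩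
  · rintro h
    simp only [Bool.and_eq_true, List.all_eq_true, Bool.not_eq_true', List.isEmpty_eq_false_iff] at h
    obtain ⟨hne, hall⟩ := h
    have hall' : ∀ x ∈ l, x = v := fun x hx => by simpa using hall x hx
    have hofl : PySem.Set.ofList l = [v] := by
      cases l with
      | nil => exact absurd rfl hne
      | cons x xs =>
        have hx : x = v := hall' x (List.mem_cons_self ..)
        rw [PySem.Set.ofList_cons]
        have : PySem.Set.discard (PySem.Set.ofList xs) x = [] := by
          rw [List.eq_nil_iff_forall_not_mem]
          intro y hy
          rw [PySem.Set.mem_discard] at hy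
          exact hy.2 ((hall' y (List.mem_cons_of_mem _ ((PySem.Set.mem_ofList _ _).1 hy.1))).trans hx.symm)
        rw [this, hx]
    rw [hofl]
    refine ⟨rfl, (PySem.Set.equal_iff _ _).2 fun x => by simp [PySem.Set.mem_ofList]⟩

-- the tail loops agree step by step
lemma pvExtLoop_eq (m : List (Int × (Int × Int))) (vertex start : Int) :
    ∀ (r : List Int), (∀ i ∈ r, start ≤ i) →
    (pvAExtLoop (m.filter (fun te => decide (te.1 ≥ start))) vertex r).1
      = pvBTail (pvGroupTgt m) vertex r := by
  intro r
  induction r with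
  | nil => intro _; rfl
  | cons i rest ih =>
    intro hr
    have hsi : start ≤ i := hr i (List.mem_cons_self ..)
    have hfil : (m.filter (fun te => decide (te.1 ≥ start))).filter (fun te => te.1 == i)
        = m.filter (fun te => te.1 == i) := by
      rw [List.filter_filter]
      apply List.filter_congr
      intro te _
      by_cases hte : te.1 = i
      · simp [hte, hsi]
      · simp [hte]
    rw [show pvAExtLoop (m.filter (fun te => decide (te.1 ≥ start))) vertex (i :: rest)
        = (if (PySem.Set.ofList (((m.filter (fun te => decide (te.1 ≥ start))).filter (fun te => te.1 == i)).map (fun te => te.2.2))).len = 1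
              ∧ PySem.Set.equal (PySem.Set.ofList (((m.filter (fun te => decide (te.1 ≥ start))).filter (fun te => te.1 == i)).map (fun te => te.2.2)))
                  (PySem.Set.ofList [vertex]) = true
           then (true, some ([vertex], i))
           else pvAExtLoop (m.filter (fun te => decide (te.1 ≥ start))) vertex rest) from rfl]
    rw [show pvBTail (pvGroupTgt m) vertex (i :: rest)
        = (if !((pvGroupTgt m).getD i []).isEmpty
              && ((pvGroupTgt m).getD i []).all (fun v => v == vertex)
           then true
           else pvBTail (pvGroupTgt m) vertex rest) from rfl]
    simp only [hfil, pvGroupTgt_getD]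
    by_cases hcond : (PySem.Set.ofList ((m.filter (fun te => te.1 == i)).map (fun te => te.2.2))).len = 1
        ∧ PySem.Set.equal (PySem.Set.ofList ((m.filter (fun te => te.1 == i)).map (fun te => te.2.2)))
            (PySem.Set.ofList [vertex]) = true
    · rw [if_pos hcond, if_pos ((pvExt_cond _ _).1 hcond)]
    · rw [if_neg hcond, if_neg (fun hb => hcond ((pvExt_cond _ _).2 hb))]
      exact ih (fun j hj => hr j (List.mem_cons_of_mem _ hj))

lemma main_eq (mdds : List (List (Int × (Int × Int)))) (paths : List (List Int)) :
    find_dependency_conflict mdds paths = find_dependency_conflict_alt mdds paths := by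
  simp only [find_dependency_conflict, find_dependency_conflict_alt, find_extended_mdd_conflict]
  set p0 := paths.getD 0 [] with hp0
  set p1 := paths.getD 1 [] with hp1
  set m0 := mdds.getD 0 [] with hm0
  set m1 := mdds.getD 1 [] with hm1
  set minT : Int := min (p0.length : Int) (p1.length : Int) with hminT
  set maxT : Int := max (p0.length : Int) (p1.length : Int) with hmaxT
  set h0 := PySem.List.pyGetD p0 0 0
  set h1 := PySem.List.pyGetD p1 0 0
  have hjoint : PySem.Set.add (PySem.Set.empty) ((0 : Int), (h0, h1)) = [(0, (h0, h1))] := rfl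
  rw [hjoint, pvBack_eq_foldr m0 m1 (PySem.List.pyRange 1 minT)]
  have hdep : pvALoop m0 m1 (PySem.List.pyRange 1 minT) [(0, (h0, h1))]
      = pvBDep ((PySem.List.pyRange 1 minT).foldr
          (fun i W => some (pvBLevel (pvGroup m0) (pvGroup m1) W i)) none) (h0, h1) := by
    cases hRm : (PySem.List.pyRange 1 minT).foldr
        (fun i W => some (pvBLevel (pvGroup m0) (pvGroup m1) W i)) none with
    | none =>
      rw [(pvBack_none_iff m0 m1 _).1 hRm]
      rfl
    | some w =>
      have hml := pvALoop_chain m0 m1 (minT - 1).toNat 1 minT [(0, (h0, h1))] [(h0, h1)]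
        (by omega)
        (by rintro j p hp; simp at hp; omega)
        (by intro p; simp)
        (by simp)
      rw [hml]
      have hch := pvBack_mem m0 m1 (PySem.List.pyRange 1 minT) w hRm (h0, h1)
      have hany : ([(h0, h1)].any fun p => pvChain m0 m1 (PySem.List.pyRange 1 minT) p)
          = w.contains (h0, h1) := by
        rw [Bool.eq_iff_iff, List.any_eq_true]
        constructor
        · rintro ⟨p, hp, hc⟩
          simp only [List.mem_singleton] at hp
          subst hp
          exact (PySem.Set.contains_iff _ _).2 (hch.2 hc)
        · intro hc
          exact ⟨(h0, h1), List.mem_singleton.2 rfl, hch.1 ((PySem.Set.contains_iff _ _).1 hc)⟩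
      rw [hany]
      rfl
  rw [hdep]
  by_cases hb : pvBDep ((PySem.List.pyRange 1 minT).foldr
      (fun i W => some (pvBLevel (pvGroup m0) (pvGroup m1) W i)) none) (h0, h1) = true
  · rw [if_pos hb, if_pos hb]
  · rw [if_neg hb, if_neg hb]
    by_cases heq : (p0.length : Int) = (p1.length : Int)
    · rw [if_pos (by omega), if_pos heq]
    · rw [if_neg (by omega), if_neg heq]
      have hmem : ∀ i ∈ PySem.List.pyRange minT maxT, minT ≤ i := by
        intro i hi; exact (PySem.List.mem_pyRange_one.1 hi).1
      by_cases hgt : p1.length < p0.length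
      · rw [if_pos (show p0.length > p1.length from hgt),
            if_pos (show p0.length > p1.length from hgt),
            if_neg (show ¬ p0.length < p1.length by omega)]
        exact pvExtLoop_eq m0 (PySem.List.pyGetD p1 (-1) 0) minT (PySem.List.pyRange minT maxT) hmem
      · rw [if_neg (show ¬ p0.length > p1.length from hgt),
            if_neg (show ¬ p0.length > p1.length from hgt),
            if_pos (show p0.length < p1.length by omega)]
        exact pvExtLoop_eq m1 (PySem.List.pyGetD p0 (-1) 0) minT (PySem.List.pyRange minT maxT) hmem

-- ===== VERDICT (by name: the statement is the Claim_ definition above) =====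
theorem find_dependency_conflict_spec : Claim_equal_find_dependency_conflict := by
  intro mdds paths _ _
  unfold Spec_find_dependency_conflict
  exact main_eq mdds paths
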